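-- pv_equiv track=rewrite | github.com/daniel-reich/ubiquitous-fiesta | dBBhtQqKZb2eDERHg_12.py | numberSequence
-- ===== SOURCE A (Python) =====
-- def numberSequence(n):
--     if n <= 0:
--         return "-1"
--     elif n == 1:
--         return "1"
--     elif n == 2:
--         return "1 1"
--     else:
--         if n % 2 == 0:
--             return str(n // 2) + " " + numberSequence(n - 2) + ' ' + str(n // 2)
--         else:
--             return str((n + 1) // 2) + " " + numberSequence(n - 2) + ' ' + str((n + 1) // 2)
-- ===== SOURCE B (Python) =====
-- def numberSequence(n):
--     if n <= 0:
--         return "-1"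
--     if n % 2 == 0:
--         k = n // 2
--         seq = list(range(k, 0, -1)) + list(range(1, k + 1))
--     else:
--         m = (n + 1) // 2
--         seq = list(range(m, 0, -1)) + list(range(2, m + 1))
--     return " ".join(map(str, seq))
-- ===== Notes on version B (the rewrite author's own statement) =====
-- stated objective: simpler
-- what changed: Replaces the O(n)-deep recursion that wraps the middle with two outer numbers each step by a direct closed-form construction: the whole palindrome is two arithmetic ranges joined once.
import Mathlib
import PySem

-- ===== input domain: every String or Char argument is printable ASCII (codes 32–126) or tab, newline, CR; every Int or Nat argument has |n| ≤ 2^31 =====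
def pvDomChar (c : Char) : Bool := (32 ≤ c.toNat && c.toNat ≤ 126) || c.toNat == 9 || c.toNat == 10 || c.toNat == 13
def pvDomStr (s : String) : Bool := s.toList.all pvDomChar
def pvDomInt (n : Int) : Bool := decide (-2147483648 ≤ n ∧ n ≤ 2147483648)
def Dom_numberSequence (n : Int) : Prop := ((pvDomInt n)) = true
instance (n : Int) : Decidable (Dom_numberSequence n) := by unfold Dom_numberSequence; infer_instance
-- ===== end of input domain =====

-- B builds the whole palindrome as two arithmetic ranges joined once, instead of A's
-- recursion that wraps the shrinking middle with two outer numbers at each step.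

-- ===== PORT A =====
def numberSequence (n : Int) : String :=
  if _h0 : n ≤ 0 then "-1"
  else if n = 1 then "1"
  else if n = 2 then "1 1"
  else if PySem.Int.mod n 2 = 0 then
    PySem.Int.toStr (PySem.Int.floordiv n 2) ++ " " ++ numberSequence (n - 2) ++ " "
      ++ PySem.Int.toStr (PySem.Int.floordiv n 2)
  else
    PySem.Int.toStr (PySem.Int.floordiv (n + 1) 2) ++ " " ++ numberSequence (n - 2) ++ " "
      ++ PySem.Int.toStr (PySem.Int.floordiv (n + 1) 2)
termination_by n.toNat
decreasing_by all_goals omega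

-- ===== PORT B =====
def numberSequence_alt (n : Int) : String :=
  if n ≤ 0 then "-1"
  else
    let seq : List Int :=
      if PySem.Int.mod n 2 = 0 then
        PySem.List.pyRange (PySem.Int.floordiv n 2) 0 (-1)
          ++ PySem.List.pyRange 1 (PySem.Int.floordiv n 2 + 1) 1
      else
        PySem.List.pyRange (PySem.Int.floordiv (n + 1) 2) 0 (-1)
          ++ PySem.List.pyRange 2 (PySem.Int.floordiv (n + 1) 2 + 1) 1
    PySem.Str.join " " (seq.map PySem.Int.toStr)

-- ===== PRECONDITION & SPEC =====
-- Pre_ excludes large n, on which A's recursion (depth about n/2) exceeds CPython's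
-- recursion limit and raises RecursionError; the exact cutoff depends on ambient stack
-- depth, so Pre_ stays conservatively below it (A still returns between the bound and the cutoff).
def Pre_numberSequence (n : Int) : Prop := n ≤ 18000
instance (n : Int) : Decidable (Pre_numberSequence n) := by unfold Pre_numberSequence; infer_instance
def pvWitness_numberSequence : Int := (5)
def Spec_numberSequence (n : Int) (out : String) : Prop := out = numberSequence_alt n
instance (n : Int) (out : String) : Decidable (Spec_numberSequence n out) := by unfold Spec_numberSequence; infer_instance

-- ===== CLAIM (what is proved, stated in full; the proofs are below) =====
def Claim_equal_numberSequence : Prop := ∀ (n : Int), Dom_numberSequence n → Pre_numberSequence n → Spec_numberSequence n (numberSequence n)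

-- ===== LEMMAS AND PROOFS =====

theorem pvJoin_cons (x y : String) (xs : List String) :
    PySem.Str.join " " (x :: y :: xs) = x ++ " " ++ PySem.Str.join " " (y :: xs) := by
  apply String.ext
  simp [PySem.Str.toList_join, PySem.Chars.join_cons_cons, String.toList_append]

theorem pvJoin_append_singleton (xs : List String) (hx : xs ≠ []) (b : String) :
    PySem.Str.join " " (xs ++ [b]) = PySem.Str.join " " xs ++ " " ++ b := by
  induction xs with
  | nil => exact absurd rfl hx
  | cons x xs ih =>
    cases xs with
    | nil =>
      apply String.ext
      simp [PySem.Str.toList_join, PySem.Chars.join_cons_cons, PySem.Chars.join_singleton,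
        String.toList_append]
    | cons y ys =>
      simp only [List.cons_append]
      rw [pvJoin_cons x y (ys ++ [b]), ← List.cons_append, ih (by simp), pvJoin_cons x y ys]
      simp [String.append_assoc]

theorem pvJoin_wrap (a b : String) (M : List String) (hM : M ≠ []) :
    PySem.Str.join " " (a :: (M ++ [b])) = a ++ " " ++ PySem.Str.join " " M ++ " " ++ b := by
  obtain ⟨z, zs, rfl⟩ := List.exists_cons_of_ne_nil hM
  rw [List.cons_append, pvJoin_cons, ← List.cons_append, pvJoin_append_singleton _ hM]
  simp [String.append_assoc]

-- for n ≥ 3, B's closed form satisfies exactly A's recurrence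
theorem pvAlt_step (n : Int) (h3 : 3 ≤ n) :
    numberSequence_alt n =
      PySem.Int.toStr (PySem.Int.floordiv (if PySem.Int.mod n 2 = 0 then n else n + 1) 2)
        ++ " " ++ numberSequence_alt (n - 2) ++ " "
        ++ PySem.Int.toStr (PySem.Int.floordiv (if PySem.Int.mod n 2 = 0 then n else n + 1) 2) := by
  have hmod : PySem.Int.mod n 2 = n % 2 := by
    simp [PySem.Int.mod, Int.fmod_eq_emod]
  have hmod' : PySem.Int.mod (n - 2) 2 = n % 2 := by
    simp only [PySem.Int.mod, Int.fmod_eq_emod]; omega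
  have hdiv : ∀ m : Int, PySem.Int.floordiv m 2 = m / 2 := by
    intro m; simp [PySem.Int.floordiv, Int.fdiv_eq_ediv]
  rw [numberSequence_alt, numberSequence_alt,
    if_neg (by omega : ¬ n ≤ 0), if_neg (by omega : ¬ n - 2 ≤ 0)]
  by_cases hp : n % 2 = 0
  · -- even: n ≥ 4, k = n/2 ≥ 2
    have hd2 : (n - 2) / 2 = n / 2 - 1 := by omega
    simp only [hmod, hmod', hdiv, hp, reduceIte, hd2]
    rw [show (n / 2 - 1 + 1 : Int) = n / 2 from by ring,
      PySem.List.pyRange_neg_one_cons (show (0:Int) < n / 2 by omega),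
      PySem.List.pyRange_one_succ_right (show (1:Int) ≤ n / 2 by omega)]
    have hmid : ((PySem.List.pyRange (n / 2 - 1) 0 (-1)
        ++ PySem.List.pyRange 1 (n / 2) 1).map PySem.Int.toStr) ≠ [] := by
      have hlen := PySem.List.length_pyRange_neg_one (n / 2 - 1) 0
      intro hc
      simp only [List.map_eq_nil_iff, List.append_eq_nil_iff] at hc
      rw [hc.1] at hlen
      simp at hlen; omega
    calc PySem.Str.join " "
          (((n / 2 :: PySem.List.pyRange (n / 2 - 1) 0 (-1))
            ++ (PySem.List.pyRange 1 (n / 2) 1 ++ [n / 2])).map PySem.Int.toStr)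
        = PySem.Str.join " "
            (PySem.Int.toStr (n / 2)
              :: ((PySem.List.pyRange (n / 2 - 1) 0 (-1)
                  ++ PySem.List.pyRange 1 (n / 2) 1).map PySem.Int.toStr
                ++ [PySem.Int.toStr (n / 2)])) := by
          congr 1; simp
      _ = _ := by rw [pvJoin_wrap _ _ _ hmid]
  · -- odd: n ≥ 3, m = (n+1)/2 ≥ 2
    have hp2 : n % 2 = 1 := by omega
    have hd2 : (n - 2 + 1) / 2 = (n + 1) / 2 - 1 := by omega
    simp only [hmod, hmod', hdiv, hp2, hd2, if_neg (show ¬(1:Int) = 0 from by norm_num)]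
    rw [show ((n + 1) / 2 - 1 + 1 : Int) = (n + 1) / 2 from by ring,
      PySem.List.pyRange_neg_one_cons (show (0:Int) < (n + 1) / 2 by omega),
      PySem.List.pyRange_one_succ_right (show (2:Int) ≤ (n + 1) / 2 by omega)]
    have hmid : ((PySem.List.pyRange ((n + 1) / 2 - 1) 0 (-1)
        ++ PySem.List.pyRange 2 ((n + 1) / 2) 1).map PySem.Int.toStr) ≠ [] := by
      have hlen := PySem.List.length_pyRange_neg_one ((n + 1) / 2 - 1) 0
      intro hc
      simp only [List.map_eq_nil_iff, List.append_eq_nil_iff] at hc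
      rw [hc.1] at hlen
      simp at hlen; omega
    calc PySem.Str.join " "
          ((((n + 1) / 2 :: PySem.List.pyRange ((n + 1) / 2 - 1) 0 (-1))
            ++ (PySem.List.pyRange 2 ((n + 1) / 2) 1 ++ [(n + 1) / 2])).map PySem.Int.toStr)
        = PySem.Str.join " "
            (PySem.Int.toStr ((n + 1) / 2)
              :: ((PySem.List.pyRange ((n + 1) / 2 - 1) 0 (-1)
                  ++ PySem.List.pyRange 2 ((n + 1) / 2) 1).map PySem.Int.toStr
                ++ [PySem.Int.toStr ((n + 1) / 2)])) := by
          congr 1; simp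
      _ = _ := by rw [pvJoin_wrap _ _ _ hmid]

theorem pvAlt_one : numberSequence_alt 1 = "1" := by
  rw [numberSequence_alt]
  norm_num [show PySem.Int.mod 1 2 = 1 by decide, show PySem.Int.floordiv (1+1) 2 = 1 by decide,
    show PySem.List.pyRange 1 0 (-1) = [1] by decide, show PySem.List.pyRange 2 2 1 = [] by decide]
  apply String.ext
  simp [PySem.Str.toList_join, PySem.Chars.join_singleton, PySem.Int.toList_toStr]
  decide

theorem pvAlt_two : numberSequence_alt 2 = "1 1" := by
  rw [numberSequence_alt]
  norm_num [show PySem.Int.mod 2 2 = 0 by decide, show PySem.Int.floordiv 2 2 = 1 by decide,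
    show PySem.List.pyRange 1 0 (-1) = [1] by decide, show PySem.List.pyRange 1 2 1 = [1] by decide]
  apply String.ext
  simp [PySem.Str.toList_join, PySem.Chars.join_cons_cons, PySem.Chars.join_singleton,
    PySem.Int.toList_toStr]
  decide

theorem pvMain (k : Nat) : ∀ n : Int, n.toNat ≤ k → numberSequence n = numberSequence_alt n := by
  induction k with
  | zero =>
    intro n hn
    have h0 : n ≤ 0 := by omega
    rw [numberSequence, numberSequence_alt, dif_pos h0, if_pos h0]
  | succ k ih =>
    intro n hn
    by_cases h0 : n ≤ 0
    · rw [numberSequence, numberSequence_alt, dif_pos h0, if_pos h0]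
    · by_cases h1 : n = 1
      · subst h1; rw [numberSequence, pvAlt_one]; norm_num
      · by_cases h2 : n = 2
        · subst h2; rw [numberSequence, pvAlt_two]; norm_num
        · have h3 : 3 ≤ n := by omega
          rw [numberSequence, dif_neg h0, if_neg h1, if_neg h2, pvAlt_step n h3,
            ih (n - 2) (by omega)]
          by_cases hp : PySem.Int.mod n 2 = 0
          · rw [if_pos hp, if_pos hp]
          · rw [if_neg hp, if_neg hp]

-- ===== VERDICT (by name: the statement is the Claim_ definition above) =====
theorem numberSequence_spec : Claim_equal_numberSequence := by
  intro n _ _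
  unfold Spec_numberSequence
  exact pvMain n.toNat n le_rfl
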